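-- pv_equiv track=rewrite | github.com/nowei/stackoverflow | antidiagonal_69604967/69604967.py | print_diagonal
-- ===== SOURCE A (Python) =====
-- def print_diagonal(A):
--
--     n = len(A)
--     m = len(A[0])
--     result = []
--     length = min(n, m)
--
--     # Top-left to top-right
--     for k in range(m):
--         result.append([0 for _ in range(length)])
--         i = 0
--         j = k
--         while j >= 0 and i < n:
--             result[-1][i] = A[i][j]
--             i = i + 1
--             j = j - 1
--
--     # Top-right to bottom-right
--     for k in range(1,n):
--         result.append([0 for _ in range(length)])
--         i = k
--         j = m - 1
--         while j >= 0 and i < n: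
--             result[-1][i - k] = A[i][j]
--             i = i + 1
--             j = j - 1
--     return result
-- ===== SOURCE B (Python) =====
-- def print_diagonal(A):
--     n = len(A)
--     m = len(A[0])
--     length = min(n, m)
--     result = [[0] * length for _ in range(n + m - 1)]
--     for i in range(n):
--         for j in range(m):
--             d = i + j
--             i_min = max(0, d - m + 1)
--             result[d][i - i_min] = A[i][j]
--     return result
-- ===== Notes on version B (the rewrite author's own statement) =====
-- stated objective: simpler
-- what changed: B pre-allocates all n+m-1 zero-padded rows and makes one row-major pass over the matrix, scattering each cell A[i][j] into result[i+j][i - max(0, i+j-m+1)], instead of A's two separate diagonal walks with nested while loops.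
import Mathlib
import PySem

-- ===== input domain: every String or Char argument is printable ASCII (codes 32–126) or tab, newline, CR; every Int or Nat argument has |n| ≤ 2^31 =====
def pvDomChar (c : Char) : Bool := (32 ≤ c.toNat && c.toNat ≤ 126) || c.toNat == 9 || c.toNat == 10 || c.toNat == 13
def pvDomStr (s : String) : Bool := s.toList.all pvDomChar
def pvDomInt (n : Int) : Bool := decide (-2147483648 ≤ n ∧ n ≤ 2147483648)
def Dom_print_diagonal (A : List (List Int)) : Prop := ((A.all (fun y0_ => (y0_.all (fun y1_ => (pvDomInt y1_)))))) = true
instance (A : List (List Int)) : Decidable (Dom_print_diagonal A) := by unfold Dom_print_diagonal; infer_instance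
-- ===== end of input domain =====

-- B pre-allocates the padded output and scatters each matrix cell into its antidiagonal
-- bucket in one row-major pass, instead of A's per-diagonal nested while-loop walks (objective: simpler).


-- ===== PORT A =====
-- A's while loop: walk down-left along one antidiagonal, writing row[i - off]
-- (off = 0 in the first for-loop, off = k in the second); recursion on n - i.
def fillDiag (A : List (List Int)) (n off : Nat) (row : List Int) (i : Nat) (j : Int) : List Int :=
  if h : 0 ≤ j ∧ i < n then
    fillDiag A n off (row.set (i - off) ((A.getD i []).getD j.toNat 0)) (i + 1) (j - 1)
  else row
termination_by n - i
decreasing_by omega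

def print_diagonal (A : List (List Int)) : List (List Int) :=
  let n := A.length
  let m := (A.headD []).length
  let length := min n m
  ((List.range m).map (fun k : Nat => fillDiag A n 0 (List.replicate length 0) 0 (k : Int)))
    ++ ((List.range' 1 (n - 1)).map (fun k => fillDiag A n k (List.replicate length 0) k ((m : Int) - 1)))

-- ===== PORT B =====
def print_diagonal_alt (A : List (List Int)) : List (List Int) :=
  let n := A.length
  let m := (A.headD []).length
  let length := min n m
  (List.range n).foldl (fun res i =>
    (List.range m).foldl (fun res j =>
      let d := i + j
      let imin := d + 1 - m   -- Nat subtraction = max(0, d - m + 1)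
      res.set d ((res.getD d []).set (i - imin) ((A.getD i []).getD j 0))) res)
    (List.replicate (n + m - 1) (List.replicate length 0))

-- ===== PRECONDITION & SPEC =====
-- Pre_ excludes exactly the inputs on which the Python A raises IndexError:
-- the empty matrix (A[0]) and matrices where some row is shorter than the first
-- row (both programs eventually read every cell A[i][j] with j < len(A[0])).
def Pre_print_diagonal (A : List (List Int)) : Prop :=
  A ≠ [] ∧ ∀ row ∈ A, (A.headD []).length ≤ row.length
instance (A : List (List Int)) : Decidable (Pre_print_diagonal A) := by
  unfold Pre_print_diagonal; infer_instance
def pvWitness_print_diagonal : List (List Int) := [[1, 2, 3], [4, 5, 6]]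
def Spec_print_diagonal (A : List (List Int)) (out : List (List Int)) : Prop := out = print_diagonal_alt A
instance (A : List (List Int)) (out : List (List Int)) : Decidable (Spec_print_diagonal A out) := by unfold Spec_print_diagonal; infer_instance

-- ===== CLAIM (what is proved, stated in full; the proofs are below) =====
def Claim_equal_print_diagonal : Prop := ∀ (A : List (List Int)), Dom_print_diagonal A → Pre_print_diagonal A → Spec_print_diagonal A (print_diagonal A)

-- ===== LEMMAS AND PROOFS =====

-- closed-form description of the output restricted to source rows i < r: row d, position p
def specRowR (A : List (List Int)) (n m r d : Nat) : List Int :=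
  (List.range (min n m)).map (fun p =>
    if p + (d + 1 - m) < r ∧ p + (d + 1 - m) ≤ d ∧ d - (p + (d + 1 - m)) < m
    then (A.getD (p + (d + 1 - m)) []).getD (d - (p + (d + 1 - m))) 0 else 0)

def specOut (A : List (List Int)) : List (List Int) :=
  (List.range (A.length + (A.headD []).length - 1)).map
    (specRowR A A.length (A.headD []).length A.length)

theorem pv_getElem?_map_range {α : Type} (f : Nat → α) (L i : Nat) :
    ((List.range L).map f)[i]? = if i < L then some (f i) else none := by
  by_cases h : i < L
  · rw [List.getElem?_map, List.getElem?_range h]; simp [h]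
  · rw [List.getElem?_eq_none (by simpa using h)]; simp [h]

theorem pv_set_map_range {α : Type} (f : Nat → α) (L p : Nat) (v : α) (hp : p < L) :
    ((List.range L).map f).set p v = (List.range L).map (fun q => if q = p then v else f q) := by
  apply List.ext_getElem?; intro i
  rw [List.getElem?_set, pv_getElem?_map_range, pv_getElem?_map_range]
  by_cases hpi : p = i
  · subst hpi; simp [hp]
  · simp only [hpi, if_false]
    split
    · rw [if_neg (fun h => hpi h.symm)]
    · rfl

theorem fillDiag_getElem? (A : List (List Int)) (n off : Nat) :
    ∀ (i : Nat) (row : List Int) (j : Int), off ≤ i → ∀ (t : Nat),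
      (fillDiag A n off row i j)[t]? =
        if i - off ≤ t ∧ t + off < n ∧ ((t : Int) + off - i ≤ j) ∧ t < row.length
        then some ((A.getD (t + off) []).getD (j - ((t : Int) + off - i)).toNat 0)
        else row[t]? := by
  suffices H : ∀ fuel i (row : List Int) (j : Int), n - i ≤ fuel → off ≤ i → ∀ t,
      (fillDiag A n off row i j)[t]? =
        if i - off ≤ t ∧ t + off < n ∧ ((t : Int) + off - i ≤ j) ∧ t < row.length
        then some ((A.getD (t + off) []).getD (j - ((t : Int) + off - i)).toNat 0)
        else row[t]? by
    exact fun i row j h t => H (n - i) i row j le_rfl h t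
  intro fuel
  induction fuel with
  | zero =>
    intro i row j hf hoff t
    rw [fillDiag, dif_neg (by omega), if_neg (by omega)]
  | succ f ih =>
    intro i row j hf hoff t
    rw [fillDiag]
    split
    case isTrue hc =>
      rw [ih (i + 1) _ (j - 1) (by omega) (by omega) t]
      simp only [Nat.cast_add, Nat.cast_one]
      have harg : (j - 1) - ((t : Int) + (off : Int) - ((i : Int) + 1)) = j - ((t : Int) + off - i) := by ring
      rw [harg, List.length_set, List.getElem?_set]
      by_cases hC1 : i + 1 - off ≤ t ∧ t + off < n ∧ (t : Int) + (off : Int) - ((i : Int) + 1) ≤ j - 1 ∧ t < row.length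
      · rw [if_pos hC1, if_pos (by omega)]
      · rw [if_neg hC1]
        by_cases ht : i - off = t
        · by_cases hlen : i - off < row.length
          · rw [if_pos ht, if_pos hlen, if_pos (by omega)]
            have hio : t + off = i := by omega
            have hj0 : j - ((t : Int) + off - i) = j := by
              have h0 : ((t : Int)) + off - i = 0 := by omega
              rw [h0, sub_zero]
            rw [hio, hj0]
          · rw [if_pos ht, if_neg hlen, if_neg (by omega)]
            exact (List.getElem?_eq_none (by omega)).symm
        · rw [if_neg ht, if_neg (by omega)]
    case isFalse hc =>
      rw [if_neg (by omega)]

theorem rowA1 (A : List (List Int)) (n m k : Nat) (hk : k < m) :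
    fillDiag A n 0 (List.replicate (min n m) 0) 0 (k : Int) = specRowR A n m n k := by
  apply List.ext_getElem?; intro t
  rw [fillDiag_getElem? A n 0 0 _ _ (le_refl 0) t]
  unfold specRowR
  rw [pv_getElem?_map_range]
  simp only [List.length_replicate, List.getElem?_replicate]
  have him : k + 1 - m = 0 := by omega
  rw [him]
  split_ifs with h1 h2 h3 h2 h3 <;> try rfl
  · -- values equal
    have e1 : t + 0 = t := by omega
    have e2 : ((k : Int) - ((t : Int) + (0 : Nat) - (0 : Nat))).toNat = k - t := by omega
    rw [e1, e2]
  · omega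
  · omega
  · omega

theorem rowA2 (A : List (List Int)) (n m k : Nat) (hk : 1 ≤ k) :
    fillDiag A n k (List.replicate (min n m) 0) k ((m : Int) - 1) = specRowR A n m n (m + k - 1) := by
  apply List.ext_getElem?; intro t
  rw [fillDiag_getElem? A n k k _ _ (le_refl k) t]
  unfold specRowR
  rw [pv_getElem?_map_range]
  simp only [List.length_replicate, List.getElem?_replicate]
  have him : (m + k - 1) + 1 - m = k := by omega
  rw [him]
  split_ifs with h1 h2 h3 h2 h3 <;> try rfl
  · -- values equal
    have e2 : (((m : Int) - 1) - ((t : Int) + (k : Nat) - (k : Nat))).toNat = (m + k - 1) - (t + k) := by omega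
    rw [e2]
  · omega
  · omega
  · omega

theorem portA_eq_spec (A : List (List Int)) : print_diagonal A = specOut A := by
  by_cases hA : A = []
  · subst hA; rfl
  · have hn : 1 ≤ A.length := by cases A with | nil => exact absurd rfl hA | cons a l => simp
    unfold print_diagonal specOut
    apply List.ext_getElem?; intro t
    rw [pv_getElem?_map_range]
    by_cases ht : t < (A.headD []).length
    · rw [List.getElem?_append_left (by simpa using ht), pv_getElem?_map_range, if_pos ht,
        rowA1 A _ _ t ht, if_pos (by omega)]
    · rw [List.getElem?_append_right (by simpa using ht)]
      simp only [List.length_map, List.length_range]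
      by_cases ht2 : t < A.length + (A.headD []).length - 1
      · rw [List.getElem?_map, List.getElem?_range' (by omega), Option.map_some,
          rowA2 A _ _ _ (by omega), if_pos ht2]
        have e : (A.headD []).length + (1 + 1 * (t - (A.headD []).length)) - 1 = t := by omega
        rw [e]
      · rw [List.getElem?_eq_none, if_neg ht2]
        simp only [List.length_map, List.length_range']
        omega

-- B side: the inner fold over the first c columns of source row i
def innerBF (A : List (List Int)) (m i : Nat) (res : List (List Int)) (c : Nat) : List (List Int) :=
  (List.range c).foldl (fun res j =>
    res.set (i + j) ((res.getD (i + j) []).set (i - (i + j + 1 - m)) ((A.getD i []).getD j 0))) res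

theorem innerBF_length (A : List (List Int)) (m i : Nat) :
    ∀ (c : Nat) (res : List (List Int)), (innerBF A m i res c).length = res.length := by
  intro c
  induction c with
  | zero => intro res; rfl
  | succ c ih =>
    intro res
    unfold innerBF
    rw [List.range_succ, List.foldl_append]
    simp only [List.foldl_cons, List.foldl_nil, List.length_set]
    exact ih res

theorem innerBF_get (A : List (List Int)) (m i : Nat) :
    ∀ (c : Nat) (res : List (List Int)) (d : Nat),
      (innerBF A m i res c)[d]? =
        if i ≤ d ∧ d < i + c
        then (res[d]?).map (fun r => r.set (i - (d + 1 - m)) ((A.getD i []).getD (d - i) 0))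
        else res[d]? := by
  intro c
  induction c with
  | zero => intro res d; rw [if_neg (by omega)]; rfl
  | succ c ih =>
    intro res d
    unfold innerBF
    rw [List.range_succ, List.foldl_append]
    simp only [List.foldl_cons, List.foldl_nil]
    have hfold : (List.range c).foldl (fun res j =>
        res.set (i + j) ((res.getD (i + j) []).set (i - (i + j + 1 - m)) ((A.getD i []).getD j 0))) res
        = innerBF A m i res c := rfl
    rw [hfold, List.getElem?_set]
    by_cases hd : d = i + c
    · subst hd
      rw [if_pos rfl, innerBF_length,
        List.getD_eq_getElem?_getD, ih res (i + c),
        if_neg (show ¬ (i ≤ i + c ∧ i + c < i + c) by omega),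
        if_pos (show i ≤ i + c ∧ i + c < i + (c + 1) by omega)]
      by_cases hL : i + c < res.length
      · rw [if_pos hL, List.getElem?_eq_getElem hL]
        simp only [Option.getD_some, Option.map_some]
        have e : i + c - i = c := by omega
        rw [e]
      · rw [if_neg hL, List.getElem?_eq_none (by omega), Option.map_none]
    · rw [if_neg (fun h => hd h.symm), ih res d]
      by_cases hc : i ≤ d ∧ d < i + c
      · rw [if_pos hc, if_pos (by omega)]
      · rw [if_neg hc, if_neg (by omega)]

-- B side: the outer fold over the first r source rows
def outerBF (A : List (List Int)) (r : Nat) : List (List Int) :=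
  (List.range r).foldl (fun res i => innerBF A (A.headD []).length i res (A.headD []).length)
    (List.replicate (A.length + (A.headD []).length - 1) (List.replicate (min A.length (A.headD []).length) 0))

theorem outerBF_get (A : List (List Int)) :
    ∀ (r : Nat), r ≤ A.length → ∀ (d : Nat),
      (outerBF A r)[d]? =
        if d < A.length + (A.headD []).length - 1
        then some (specRowR A A.length (A.headD []).length r d)
        else none := by
  intro r
  induction r with
  | zero =>
    intro _ d
    unfold outerBF
    simp only [List.range_zero, List.foldl_nil, List.getElem?_replicate]
    split_ifs with h1
    · unfold specRowR
      congr 1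
      apply List.ext_getElem?; intro p
      rw [pv_getElem?_map_range, List.getElem?_replicate]
      split_ifs with h2 h3 <;> first | rfl | omega
    · rfl
  | succ r ih =>
    intro hr d
    have hstep : outerBF A (r + 1) = innerBF A (A.headD []).length r (outerBF A r) (A.headD []).length := by
      unfold outerBF
      rw [List.range_succ, List.foldl_append]
      rfl
    rw [hstep, innerBF_get, ih (by omega) d]
    set n := A.length with hn
    set m := (A.headD []).length with hm
    by_cases htouch : r ≤ d ∧ d < r + m
    · rw [if_pos htouch, if_pos (by omega), if_pos (by omega), Option.map_some]
      congr 1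
      unfold specRowR
      have hp : r - (d + 1 - m) < min n m := by omega
      rw [pv_set_map_range _ _ _ _ hp]
      apply List.map_congr_left
      intro p hp2
      beta_reduce
      by_cases hpr : p = r - (d + 1 - m)
      · rw [if_pos hpr, if_pos (by omega)]
        have e : p + (d + 1 - m) = r := by omega
        rw [e]
      · rw [if_neg hpr]
        have e : p + (d + 1 - m) < r + 1 ∧ p + (d + 1 - m) ≤ d ∧ d - (p + (d + 1 - m)) < m
            ↔ p + (d + 1 - m) < r ∧ p + (d + 1 - m) ≤ d ∧ d - (p + (d + 1 - m)) < m := by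
          constructor
          · rintro ⟨a, b, c⟩; exact ⟨by omega, b, c⟩
          · rintro ⟨a, b, c⟩; exact ⟨by omega, b, c⟩
        rw [if_congr e rfl rfl]
    · rw [if_neg htouch]
      split_ifs with h1 <;> try rfl
      congr 1
      unfold specRowR
      apply List.map_congr_left
      intro p hp2
      beta_reduce
      have e : p + (d + 1 - m) < r + 1 ∧ p + (d + 1 - m) ≤ d ∧ d - (p + (d + 1 - m)) < m
          ↔ p + (d + 1 - m) < r ∧ p + (d + 1 - m) ≤ d ∧ d - (p + (d + 1 - m)) < m := by
        constructor
        · rintro ⟨a, b, c⟩; exact ⟨by omega, b, c⟩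
        · rintro ⟨a, b, c⟩; exact ⟨by omega, b, c⟩
      rw [if_congr e rfl rfl]

theorem portB_eq_spec (A : List (List Int)) : print_diagonal_alt A = specOut A := by
  have hport : print_diagonal_alt A = outerBF A A.length := rfl
  rw [hport]
  unfold specOut
  apply List.ext_getElem?; intro t
  rw [outerBF_get A A.length le_rfl t, pv_getElem?_map_range]

-- ===== VERDICT (by name: the statement is the Claim_ definition above) =====
theorem print_diagonal_spec : Claim_equal_print_diagonal := by
  intro A _ _
  unfold Spec_print_diagonal
  rw [portA_eq_spec, portB_eq_spec]
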